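-- pv_equiv track=rewrite | github.com/Shasa-Dzombo/APHRC_RA | app/api.py | extract_required_variables
-- ===== SOURCE A (Python) =====
-- def extract_required_variables(question: str) -> set:
--     """Extract potential required variables from a question"""
--     # Basic variable extraction - could be enhanced with NLP
--     words = question.lower().split()
--     variables = set()
--
--     # Keywords that often precede variables
--     indicators = ["rate", "level", "status", "number", "count", "percentage", "ratio",
--                 "frequency", "incidence", "prevalence", "measure", "score", "index"]
--
--     for i, word in enumerate(words):
--         # Check if word is or follows an indicator
--         if (word in indicators or
--             (i > 0 and words[i-1] in indicators)):
--             variables.add(word)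
--
--         # Check for compound variables (e.g., "education_level")
--         if "_" in word:
--             variables.add(word)
--
--     return variables
-- ===== SOURCE B (Python) =====
-- # B: staged index-set construction — collect indicator positions once, shift them
-- # by one, union with underscore positions, and emit the words at the sorted indices.
-- INDICATORS = {"rate", "level", "status", "number", "count", "percentage", "ratio",
--               "frequency", "incidence", "prevalence", "measure", "score", "index"}
--
-- def extract_required_variables(question: str) -> set:
--     words = question.lower().split()
--     n = len(words)
--     ind_pos = [i for i, w in enumerate(words) if w in INDICATORS]
--     us_pos = [i for i, w in enumerate(words) if "_" in w]
--     picked = set(ind_pos) | {i + 1 for i in ind_pos if i + 1 < n} | set(us_pos)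
--     return {words[i] for i in sorted(picked)}
-- ===== Notes on version B (the rewrite author's own statement) =====
-- stated objective: alternative
-- what changed: B replaces A's single enumerate loop with its backward words[i-1] check by a staged construction: it collects indicator positions and underscore positions as index lists, shifts the indicator positions by one, unions the index sets, and emits the words at the sorted indices.
import Mathlib
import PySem

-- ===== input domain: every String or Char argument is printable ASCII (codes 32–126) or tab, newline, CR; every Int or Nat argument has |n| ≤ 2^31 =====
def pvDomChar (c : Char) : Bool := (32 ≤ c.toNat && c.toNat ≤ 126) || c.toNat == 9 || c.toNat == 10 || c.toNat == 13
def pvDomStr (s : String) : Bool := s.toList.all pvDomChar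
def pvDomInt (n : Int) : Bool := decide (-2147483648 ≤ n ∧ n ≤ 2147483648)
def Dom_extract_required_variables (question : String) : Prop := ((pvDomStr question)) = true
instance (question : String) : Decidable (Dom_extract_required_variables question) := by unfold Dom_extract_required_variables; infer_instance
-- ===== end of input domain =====

-- B replaces A's single scan with its backward words[i-1] check by a staged index-set
-- construction: indicator positions are collected once, shifted by one, unioned with
-- underscore positions, and the words at the sorted indices are emitted (alternative decomposition).

-- ===== PORT A =====
def ervIndicators : List String :=
  ["rate", "level", "status", "number", "count", "percentage", "ratio",
   "frequency", "incidence", "prevalence", "measure", "score", "index"]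

-- A's loop: 'i > 0 and words[i-1] in indicators' carried as the previous word (none at i = 0)
def ervLoopA (prev : Option String) (ws : List String) (acc : PySem.Set String) : PySem.Set String :=
  match ws with
  | [] => acc
  | w :: rest =>
    let acc := if (ervIndicators.contains w ||
                  (match prev with | some p => ervIndicators.contains p | none => false)) then
                 PySem.Set.add acc w else acc
    let acc := if PySem.Str.isIn "_" w then PySem.Set.add acc w else acc
    ervLoopA (some w) rest acc

def extract_required_variables (question : String) : List String :=
  ervLoopA none (PySem.Str.split₀ (PySem.Str.lower question)) PySem.Set.empty

-- ===== PORT B =====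
def ervIndicatorSet : PySem.Set String :=
  PySem.Set.ofList
    ["rate", "level", "status", "number", "count", "percentage", "ratio",
     "frequency", "incidence", "prevalence", "measure", "score", "index"]

def extract_required_variables_alt (question : String) : List String :=
  let words := PySem.Str.split₀ (PySem.Str.lower question)
  let n : Int := words.length
  let indPos : List Int :=
    ((PySem.List.enumerate words).filter (fun p => PySem.Set.contains ervIndicatorSet p.2)).map Prod.fst
  let usPos : List Int :=
    ((PySem.List.enumerate words).filter (fun p => PySem.Str.isIn "_" p.2)).map Prod.fst
  let picked : PySem.Set Int :=
    PySem.Set.union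
      (PySem.Set.union (PySem.Set.ofList indPos)
        ((indPos.filter (fun i => i + 1 < n)).map (fun i => i + 1)))
      usPos
  PySem.Set.ofList
    ((PySem.List.sorted picked (fun x => x) false).map (fun i => PySem.List.pyGetD words i ""))

-- ===== PRECONDITION & SPEC =====
def Spec_extract_required_variables (question : String) (out : List String) : Prop := out = extract_required_variables_alt question
instance (question : String) (out : List String) : Decidable (Spec_extract_required_variables question out) := by unfold Spec_extract_required_variables; infer_instance

-- ===== CLAIM (what is proved, stated in full; the proofs are below) =====
def Claim_equal_extract_required_variables : Prop := ∀ (question : String), Dom_extract_required_variables question → Spec_extract_required_variables question (extract_required_variables question)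

-- ===== LEMMAS AND PROOFS =====

-- the position-k word qualifies: it is an indicator, follows an indicator, or contains '_'
def ervQ (ws : List String) (k : Nat) : Bool :=
  ervIndicators.contains (ws.getD k "") ||
  (decide (0 < k) && ervIndicators.contains (ws.getD (k - 1) "")) ||
  PySem.Str.isIn "_" (ws.getD k "")

def ervQualIdx (ws : List String) : List Nat := (List.range ws.length).filter (ervQ ws)

def ervL (ws : List String) : List String := (ervQualIdx ws).map (fun k => ws.getD k "")

def ervPrevAt (ws : List String) (k : Nat) : Option String :=
  if k = 0 then none else some (ws.getD (k - 1) "")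

lemma erv_add_add (acc : PySem.Set String) (w : String) :
    PySem.Set.add (PySem.Set.add acc w) w = PySem.Set.add acc w := by
  apply PySem.Set.add_of_mem
  exact (PySem.Set.mem_add _ _ _).mpr (Or.inr rfl)

lemma erv_two_ifs (c1 c2 : Bool) (acc : PySem.Set String) (w : String) :
    (if c2 then PySem.Set.add (if c1 then PySem.Set.add acc w else acc) w
     else (if c1 then PySem.Set.add acc w else acc)) =
    if c1 || c2 then PySem.Set.add acc w else acc := by
  cases c1 <;> cases c2 <;> simp [erv_add_add]

lemma erv_loopA_eq (tail : List String) : ∀ (ws : List String) (k : Nat) (acc : PySem.Set String),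
    tail = ws.drop k → k ≤ ws.length →
    ervLoopA (ervPrevAt ws k) tail acc =
      PySem.Set.update acc (((List.range' k (ws.length - k)).filter (ervQ ws)).map
        (fun j => ws.getD j "")) := by
  induction tail with
  | nil =>
    intro ws k acc hdrop hk
    have : ws.length ≤ k := by
      by_contra h
      push_neg at h
      have := List.drop_eq_nil_iff.mp hdrop.symm
      omega
    have hlen : ws.length - k = 0 := by omega
    simp [ervLoopA, hlen, PySem.Set.update]
  | cons w rest ih =>
    intro ws k acc hdrop hk
    have hklt : k < ws.length := by
      by_contra h
      push_neg at h
      have : ws.drop k = [] := List.drop_eq_nil_iff.mpr h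
      rw [this] at hdrop; simp at hdrop
    have hw : w = ws.getD k "" := by
      have h := congrArg (fun l => l.getD 0 "") hdrop
      simp only [List.getD_eq_getElem?_getD, List.getElem?_drop, Nat.add_zero] at h
      simpa using h
    have hrest : rest = ws.drop (k + 1) := by
      have h := congrArg List.tail hdrop
      simpa [List.tail_drop] using h
    have hrange : ws.length - k = (ws.length - (k + 1)) + 1 := by omega
    have hcond : ((ervIndicators.contains w ||
        (match ervPrevAt ws k with | some p => ervIndicators.contains p | none => false)) ||
        PySem.Str.isIn "_" w) = ervQ ws k := by
      unfold ervPrevAt ervQ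
      rw [← hw]
      by_cases h0 : k = 0
      · subst h0
        rw [if_pos rfl]
        have h1 : decide (0 < 0) = false := rfl
        rw [h1]
        simp only [Bool.false_and, Bool.or_false]
      · rw [if_neg h0]
        have hd : decide (0 < k) = true := by simp; omega
        rw [hd]
        simp only [Bool.true_and, Bool.or_assoc]
    have hprev : ervPrevAt ws (k + 1) = some w := by
      unfold ervPrevAt
      simp [hw]
    have step : ervLoopA (ervPrevAt ws k) (w :: rest) acc =
        ervLoopA (ervPrevAt ws (k + 1)) rest
          (if ervQ ws k then PySem.Set.add acc w else acc) := by
      rw [hprev]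
      simp only [ervLoopA]
      rw [erv_two_ifs, hcond]
    rw [step, ih ws (k + 1) _ hrest (by omega)]
    rw [hrange, List.range'_succ, List.filter_cons]
    cases hq : ervQ ws k
    · simp
    · have hw' : ws[k]?.getD "" = w := by rw [hw, List.getD_eq_getElem?_getD]
      simp [PySem.Set.update_cons, hw']

-- A's result is the ordered first occurrences of the qualifying words
lemma erv_A_eq (ws : List String) :
    ervLoopA none ws PySem.Set.empty = PySem.Set.ofList (ervL ws) := by
  have := erv_loopA_eq ws ws 0 PySem.Set.empty (by simp) (by omega)
  have h0 : ervPrevAt ws 0 = none := rfl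
  rw [h0] at this
  rw [this]
  unfold ervL ervQualIdx
  rw [List.range_eq_range']
  simp [PySem.Set.update_nil_left]

lemma erv_contains_set (w : String) :
    PySem.Set.contains ervIndicatorSet w = ervIndicators.contains w := rfl

-- the position-k word qualifies, as a Prop
lemma erv_Q_iff (ws : List String) (k : Nat) (hk : k < ws.length) :
    ervQ ws k = true ↔
      (ws[k] ∈ ervIndicators ∨
       (0 < k ∧ ws[k - 1]'(by omega) ∈ ervIndicators) ∨
       PySem.Str.isIn "_" ws[k] = true) := by
  unfold ervQ
  rw [List.getD_eq_getElem ws "" hk]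
  by_cases h0 : 0 < k
  · have hk1 : k - 1 < ws.length := by omega
    rw [List.getD_eq_getElem ws "" hk1]
    simp only [Bool.or_eq_true, Bool.and_eq_true, decide_eq_true_eq, List.contains_eq_mem]
    constructor
    · rintro ((h | ⟨-, h⟩) | h)
      · exact Or.inl h
      · exact Or.inr (Or.inl ⟨h0, h⟩)
      · exact Or.inr (Or.inr h)
    · rintro (h | ⟨-, h⟩ | h)
      · exact Or.inl (Or.inl h)
      · exact Or.inl (Or.inr ⟨h0, h⟩)
      · exact Or.inr h
  · have hz : k = 0 := by omega
    subst hz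
    simp only [Bool.or_eq_true, Bool.and_eq_true, decide_eq_true_eq, List.contains_eq_mem]
    constructor
    · rintro ((h | ⟨h, -⟩) | h)
      · exact Or.inl h
      · exact absurd h (by omega)
      · exact Or.inr (Or.inr h)
    · rintro (h | ⟨h, -⟩ | h)
      · exact Or.inl (Or.inl h)
      · exact absurd h (by omega)
      · exact Or.inr h

-- members of the indicator-position list
lemma erv_mem_indPos (ws : List String) (j : Int) :
    j ∈ (((PySem.List.enumerate ws).filter
        (fun p => PySem.Set.contains ervIndicatorSet p.2)).map Prod.fst) ↔
      ∃ (k : Nat) (hk : k < ws.length), ws[k]'hk ∈ ervIndicators ∧ j = (k : Nat) := by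
  simp only [List.mem_map, List.mem_filter]
  constructor
  · rintro ⟨p, ⟨hpe, hpc⟩, hfst⟩
    rw [PySem.List.mem_enumerate_iff] at hpe
    obtain ⟨k, hk, rfl⟩ := hpe
    refine ⟨k, hk, ?_, by simpa using hfst.symm⟩
    rw [erv_contains_set] at hpc
    simpa using hpc
  · rintro ⟨k, hk, hmem, rfl⟩
    refine ⟨((0 : Int) + (k : Int), ws[k]), ⟨?_, ?_⟩, by simp⟩
    · rw [PySem.List.mem_enumerate_iff]; exact ⟨k, hk, rfl⟩
    · rw [erv_contains_set]; simpa using hmem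

-- members of the underscore-position list
lemma erv_mem_usPos (ws : List String) (j : Int) :
    j ∈ (((PySem.List.enumerate ws).filter
        (fun p => PySem.Str.isIn "_" p.2)).map Prod.fst) ↔
      ∃ (k : Nat) (hk : k < ws.length), PySem.Str.isIn "_" (ws[k]'hk) = true ∧ j = (k : Nat) := by
  simp only [List.mem_map, List.mem_filter]
  constructor
  · rintro ⟨p, ⟨hpe, hpc⟩, hfst⟩
    rw [PySem.List.mem_enumerate_iff] at hpe
    obtain ⟨k, hk, rfl⟩ := hpe
    exact ⟨k, hk, hpc, by simpa using hfst.symm⟩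
  · rintro ⟨k, hk, hus, rfl⟩
    refine ⟨((0 : Int) + (k : Int), ws[k]), ⟨?_, hus⟩, by simp⟩
    rw [PySem.List.mem_enumerate_iff]; exact ⟨k, hk, rfl⟩

-- membership in B's picked index set ↔ the position qualifies
lemma erv_mem_picked (ws : List String) (i : Int) :
    (i ∈ PySem.Set.union
      (PySem.Set.union
        (PySem.Set.ofList (((PySem.List.enumerate ws).filter (fun p => PySem.Set.contains ervIndicatorSet p.2)).map Prod.fst))
        (((((PySem.List.enumerate ws).filter (fun p => PySem.Set.contains ervIndicatorSet p.2)).map Prod.fst).filter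
            (fun i => i + 1 < (ws.length : Int))).map (fun i => i + 1)))
      (((PySem.List.enumerate ws).filter (fun p => PySem.Str.isIn "_" p.2)).map Prod.fst))
    ↔ ∃ k : Nat, k < ws.length ∧ ervQ ws k = true ∧ i = (k : Nat) := by
  rw [PySem.Set.mem_union, PySem.Set.mem_union, PySem.Set.mem_ofList]
  constructor
  · rintro ((h | h) | h)
    · obtain ⟨k, hk, hmem, rfl⟩ := (erv_mem_indPos ws i).mp h
      exact ⟨k, hk, (erv_Q_iff ws k hk).mpr (Or.inl hmem), rfl⟩
    · rw [List.mem_map] at h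
      obtain ⟨j, hj, rfl⟩ := h
      rw [List.mem_filter] at hj
      obtain ⟨hjm, hjlt⟩ := hj
      obtain ⟨k, hk, hmem, rfl⟩ := (erv_mem_indPos ws j).mp hjm
      simp only [decide_eq_true_eq] at hjlt
      have hk1 : k + 1 < ws.length := by omega
      refine ⟨k + 1, hk1, (erv_Q_iff ws (k + 1) hk1).mpr ?_, by push_cast; ring⟩
      refine Or.inr (Or.inl ⟨by omega, ?_⟩)
      simpa using hmem
    · obtain ⟨k, hk, hus, rfl⟩ := (erv_mem_usPos ws i).mp h
      exact ⟨k, hk, (erv_Q_iff ws k hk).mpr (Or.inr (Or.inr hus)), rfl⟩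
  · rintro ⟨k, hk, hq, rfl⟩
    rcases (erv_Q_iff ws k hk).mp hq with h | ⟨h0, h⟩ | h
    · exact Or.inl (Or.inl ((erv_mem_indPos ws k).mpr ⟨k, hk, h, rfl⟩))
    · refine Or.inl (Or.inr ?_)
      rw [List.mem_map]
      refine ⟨(((k - 1 : Nat)) : Int), ?_, by omega⟩
      rw [List.mem_filter]
      refine ⟨(erv_mem_indPos ws _).mpr ⟨k - 1, by omega, h, rfl⟩, ?_⟩
      simp only [decide_eq_true_eq]
      omega
    · exact Or.inr ((erv_mem_usPos ws k).mpr ⟨k, hk, h, rfl⟩)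

-- B's sorted picked indices are exactly the qualifying positions, in order
lemma erv_sorted_picked (ws : List String) :
    PySem.List.sorted
      (PySem.Set.union
        (PySem.Set.union
          (PySem.Set.ofList (((PySem.List.enumerate ws).filter (fun p => PySem.Set.contains ervIndicatorSet p.2)).map Prod.fst))
          (((((PySem.List.enumerate ws).filter (fun p => PySem.Set.contains ervIndicatorSet p.2)).map Prod.fst).filter
              (fun i => i + 1 < (ws.length : Int))).map (fun i => i + 1)))
        (((PySem.List.enumerate ws).filter (fun p => PySem.Str.isIn "_" p.2)).map Prod.fst))
      (fun x => x) false
    = List.map (fun k : Nat => (k : Int)) (ervQualIdx ws) := by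
  apply PySem.List.sorted_eq_of_perm_of_pairwise_lt
  · -- permutation: same members, both nodup
    rw [List.perm_ext_iff_of_nodup]
    · intro i
      rw [erv_mem_picked]
      unfold ervQualIdx
      constructor
      · intro h
        obtain ⟨k, hkf, hik⟩ := List.mem_map.mp h
        obtain ⟨hkr, hq⟩ := List.mem_filter.mp hkf
        exact ⟨k, List.mem_range.mp hkr, hq, hik.symm⟩
      · rintro ⟨k, hk, hq, hik⟩
        subst hik
        exact List.mem_map.mpr ⟨k, List.mem_filter.mpr ⟨List.mem_range.mpr hk, hq⟩, rfl⟩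
    · have hinj : Function.Injective (fun k : Nat => (k : Int)) := fun a b hab => Nat.cast_injective hab
      have hnd : (List.filter (ervQ ws) (List.range ws.length)).Nodup :=
        List.Nodup.filter _ List.nodup_range
      unfold ervQualIdx
      exact hnd.map hinj
    · apply PySem.Set.nodup_union
      apply PySem.Set.nodup_union
      exact PySem.Set.nodup_ofList _
  · -- strictly increasing
    unfold ervQualIdx
    rw [List.pairwise_map]
    refine List.Pairwise.imp (fun hab => by exact_mod_cast hab) ?_
    exact List.Pairwise.filter _ List.pairwise_lt_range

-- ===== VERDICT (by name: the statement is the Claim_ definition above) =====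
theorem extract_required_variables_spec : Claim_equal_extract_required_variables := by
  intro q _
  unfold Spec_extract_required_variables
  simp only [extract_required_variables, extract_required_variables_alt]
  generalize PySem.Str.split₀ (PySem.Str.lower q) = ws
  rw [erv_sorted_picked]
  have hmap : (List.map (fun k : Nat => (k : Int)) (ervQualIdx ws)).map
      (fun i => PySem.List.pyGetD ws i "") = ervL ws := by
    rw [List.map_map]
    unfold ervL
    apply List.map_congr_left
    intro k _
    simp
  rw [hmap]
  exact erv_A_eq _
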